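-- pv_equiv track=rewrite | github.com/N3pomuceno/si_progI_exercicios | 1574.py | novaPosicao
-- ===== SOURCE A (Python) =====
-- def novaPosicao(p, com, hist):
--     np = p
--     if com == "LEFT":
--         np += -1
--         return np
--     elif com == "RIGHT":
--         np += 1
--         return np
--     else:
--         p1, p2, num = com.split()
--         del p1, p2
--         num = int(num)
--         com = hist[num-1]
--         np = novaPosicao(p, com, hist)
--         return np
-- ===== SOURCE B (Python) =====
-- def novaPosicao(p, com, hist):
--     delta = {"LEFT": -1, "RIGHT": 1}
--     while com not in delta:
--         com = hist[int(com.split()[-1]) - 1]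
--     return p + delta[com]
-- ===== Notes on version B (the rewrite author's own statement) =====
-- stated objective: idiomatic
-- what changed: Replaces the chain recursion (which threads p through every call, unpacks three tokens and branches on two string literals) with a delta table keyed by the terminal command and a while-loop that rewrites the command via the last split token until it is a table key, adding the delta once at the end.
import Mathlib
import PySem

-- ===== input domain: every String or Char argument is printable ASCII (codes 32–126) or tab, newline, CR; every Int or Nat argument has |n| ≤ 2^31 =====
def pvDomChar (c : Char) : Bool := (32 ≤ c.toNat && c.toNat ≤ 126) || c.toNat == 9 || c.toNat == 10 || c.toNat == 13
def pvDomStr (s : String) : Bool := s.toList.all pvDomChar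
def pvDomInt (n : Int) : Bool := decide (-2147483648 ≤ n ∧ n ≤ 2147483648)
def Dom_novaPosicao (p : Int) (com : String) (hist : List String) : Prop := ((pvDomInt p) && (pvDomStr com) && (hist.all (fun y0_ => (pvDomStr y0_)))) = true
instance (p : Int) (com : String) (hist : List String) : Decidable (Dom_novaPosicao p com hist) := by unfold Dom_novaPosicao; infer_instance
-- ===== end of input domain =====

-- B replaces A's chain recursion (three-token unpacking, two literal branches, p threaded through
-- every call) by a delta table keyed by the terminal command and a while-loop rewriting the command
-- via its last split token, adding the delta once at the end (idiomatic).

-- ===== PORT A =====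
-- A recurses on the command; in Lean the recursion is bounded by fuel = hist.length + 1, which
-- suffices for every terminating chain (a longer chain revisits a history slot and A diverges/raises).
def novaPosicaoGo (hist : List String) : Nat → Int → String → Int
  | 0, _, _ => 0          -- unreachable under Pre_ (A raises RecursionError on cyclic chains)
  | n + 1, p, com =>
    if com = "LEFT" then p + (-1)
    else if com = "RIGHT" then p + 1
    else
      match PySem.Str.split₀ com with
      | [_, _, num] =>
        match PySem.Int.ofStr? num with
        | some k =>
          match PySem.List.pyGet? hist (k - 1) with
          | some com' => novaPosicaoGo hist n p com'
          | none => 0   -- IndexError: outside Pre_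
        | none => 0     -- ValueError (int): outside Pre_
      | _ => 0          -- ValueError (unpacking): outside Pre_

def novaPosicao (p : Int) (com : String) (hist : List String) : Int :=
  novaPosicaoGo hist (hist.length + 1) p com

-- ===== PORT B =====
-- delta = {"LEFT": -1, "RIGHT": 1}
def novaDelta : PySem.Dict String Int :=
  (PySem.Dict.empty.insert "LEFT" (-1)).insert "RIGHT" 1

-- the while-loop of Source B: none = the loop would raise or spin forever (outside Pre_)
def novaLoop (hist : List String) : Nat → Int → String → Option Int
  | 0, _, _ => none
  | n + 1, p, com =>
    match novaDelta.get? com with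
    | some d => some (p + d)
    | none =>
      (PySem.List.pyGet? (PySem.Str.split₀ com) (-1)).bind fun t =>
        (PySem.Int.ofStr? t).bind fun k =>
          (PySem.List.pyGet? hist (k - 1)).bind fun com' =>
            novaLoop hist n p com'

def novaPosicao_alt (p : Int) (com : String) (hist : List String) : Int :=
  (novaLoop hist (hist.length + 1) p com).getD 0

-- ===== PRECONDITION & SPEC =====
-- one dereference of a history reference: "<w> <w> <n>" ↦ hist[n-1] (none if the command does not
-- split into exactly three tokens, the third is not an int, or the index is out of range)
def chainStep (hist : List String) (com : String) : Option String :=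
  match PySem.Str.split₀ com with
  | [_, _, num] => (PySem.Int.ofStr? num).bind (fun k => PySem.List.pyGet? hist (k - 1))
  | _ => none

def chainDeref (hist : List String) : Nat → String → Option String
  | 0, com => some com
  | n + 1, com => (chainStep hist com).bind (chainDeref hist n)

-- Pre_: some bounded number of dereferences of the reference chain reaches "LEFT"/"RIGHT"
-- (a chain needing more than hist.length steps revisits a slot and never terminates) —
-- exactly the inputs where A returns; elsewhere A raises ValueError/IndexError/RecursionError.
def Pre_novaPosicao (p : Int) (com : String) (hist : List String) : Prop :=
  ∃ n ≤ hist.length, (chainDeref hist n com = some "LEFT" ∨ chainDeref hist n com = some "RIGHT")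
instance (p : Int) (com : String) (hist : List String) : Decidable (Pre_novaPosicao p com hist) := by unfold Pre_novaPosicao; infer_instance

def pvWitness_novaPosicao : Int × String × List String := (3, "go to 1", ["go to 2", "LEFT"])

def Spec_novaPosicao (p : Int) (com : String) (hist : List String) (out : Int) : Prop := out = novaPosicao_alt p com hist
instance (p : Int) (com : String) (hist : List String) (out : Int) : Decidable (Spec_novaPosicao p com hist out) := by unfold Spec_novaPosicao; infer_instance

-- ===== CLAIM (what is proved, stated in full; the proofs are below) =====
def Claim_equal_novaPosicao : Prop := ∀ (p : Int) (com : String) (hist : List String), Dom_novaPosicao p com hist → Pre_novaPosicao p com hist → Spec_novaPosicao p com hist (novaPosicao p com hist)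

-- ===== LEMMAS AND PROOFS =====
lemma novaDelta_get?_of_ne {com : String} (h1 : com ≠ "LEFT") (h2 : com ≠ "RIGHT") :
    novaDelta.get? com = none := by
  unfold novaDelta
  simp [PySem.Dict.get?_insert, h1, h2, PySem.Dict.get?_empty]

-- a command that successfully dereferences is not terminal ("LEFT"/"RIGHT" split into one token)
lemma chainStep_ne_terminal {hist : List String} {com com' : String}
    (hs : chainStep hist com = some com') : com ≠ "LEFT" ∧ com ≠ "RIGHT" := by
  constructor <;> rintro rfl <;>
    simp [chainStep, show PySem.Str.split₀ "LEFT" = ["LEFT"] from by decide,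
          show PySem.Str.split₀ "RIGHT" = ["RIGHT"] from by decide] at hs

-- unfold one step of the chain inside both ports
lemma chainStep_elim {hist : List String} {com com' : String}
    (hs : chainStep hist com = some com') :
    ∃ x y num k, PySem.Str.split₀ com = [x, y, num] ∧ PySem.Int.ofStr? num = some k ∧
      PySem.List.pyGet? hist (k - 1) = some com' := by
  unfold chainStep at hs
  split at hs
  · rename_i x y num heq
    rcases Option.bind_eq_some_iff.mp hs with ⟨k, hk, hg⟩
    exact ⟨x, y, num, k, heq, hk, hg⟩
  · simp at hs

-- on a chain certified by chainDeref (ending in a terminal command), A's recursion yields p ∓ 1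
lemma novaPosicaoGo_of_chain (hist : List String) :
    ∀ (n : Nat) (com : String),
      (chainDeref hist n com = some "LEFT" ∨ chainDeref hist n com = some "RIGHT") →
      ∀ (f : Nat) (p : Int), n < f →
        novaPosicaoGo hist f p com = (if chainDeref hist n com = some "LEFT" then p - 1 else p + 1) := by
  intro n
  induction n with
  | zero =>
    intro com hch f p hf
    obtain ⟨m, rfl⟩ : ∃ m, f = m + 1 := ⟨f - 1, by omega⟩
    rcases hch with h | h <;> simp_all [chainDeref, novaPosicaoGo] <;> ring
  | succ n ih =>
    intro com hch f p hf
    obtain ⟨m, rfl⟩ : ∃ m, f = m + 1 := ⟨f - 1, by omega⟩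
    have hstep : ∃ com', chainStep hist com = some com' ∧ chainDeref hist (n+1) com = chainDeref hist n com' := by
      rcases hch with h | h <;>
        · rcases Option.bind_eq_some_iff.mp (by simpa [chainDeref] using h) with ⟨com', hs, hd⟩
          exact ⟨com', hs, by simp [chainDeref, hs]⟩
    obtain ⟨com', hs, hd⟩ := hstep
    obtain ⟨h1, h2⟩ := chainStep_ne_terminal hs
    obtain ⟨x, y, num, k, hsp, hk, hg⟩ := chainStep_elim hs
    rw [hd] at hch ⊢
    simp only [novaPosicaoGo, if_neg h1, if_neg h2, hsp, hk, hg]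
    exact ih com' hch m p (by omega)

-- on the same chain, B's while-loop yields the same value
lemma novaLoop_of_chain (hist : List String) :
    ∀ (n : Nat) (com : String),
      (chainDeref hist n com = some "LEFT" ∨ chainDeref hist n com = some "RIGHT") →
      ∀ (f : Nat) (p : Int), n < f →
        novaLoop hist f p com = some (if chainDeref hist n com = some "LEFT" then p - 1 else p + 1) := by
  intro n
  induction n with
  | zero =>
    intro com hch f p hf
    obtain ⟨m, rfl⟩ : ∃ m, f = m + 1 := ⟨f - 1, by omega⟩
    rcases hch with h | h
    · have hc : com = "LEFT" := by simpa [chainDeref] using h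
      subst hc
      simp [novaLoop, show novaDelta.get? "LEFT" = some (-1) from by decide, chainDeref]
      ring
    · have hc : com = "RIGHT" := by simpa [chainDeref] using h
      subst hc
      have hne : chainDeref hist 0 "RIGHT" ≠ some "LEFT" := by
        simp [chainDeref]
      simp [novaLoop, show novaDelta.get? "RIGHT" = some 1 from by decide, if_neg hne]
  | succ n ih =>
    intro com hch f p hf
    obtain ⟨m, rfl⟩ : ∃ m, f = m + 1 := ⟨f - 1, by omega⟩
    have hstep : ∃ com', chainStep hist com = some com' ∧ chainDeref hist (n+1) com = chainDeref hist n com' := by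
      rcases hch with h | h <;>
        · rcases Option.bind_eq_some_iff.mp (by simpa [chainDeref] using h) with ⟨com', hs, hd⟩
          exact ⟨com', hs, by simp [chainDeref, hs]⟩
    obtain ⟨com', hs, hd⟩ := hstep
    obtain ⟨h1, h2⟩ := chainStep_ne_terminal hs
    obtain ⟨x, y, num, k, hsp, hk, hg⟩ := chainStep_elim hs
    have hlast : PySem.List.pyGet? (PySem.Str.split₀ com) (-1) = some num := by
      rw [hsp, PySem.List.pyGet?_neg_one]; simp
    rw [hd] at hch ⊢
    simp only [novaLoop, novaDelta_get?_of_ne h1 h2, hlast, Option.bind_some, hk, hg]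
    exact ih com' hch m p (by omega)

theorem novaPosicao_spec : Claim_equal_novaPosicao := by
  intro p com hist _ hpre
  obtain ⟨n, hn, hch⟩ := hpre
  unfold Spec_novaPosicao novaPosicao novaPosicao_alt
  rw [novaPosicaoGo_of_chain hist n com hch (hist.length + 1) p (by omega),
      novaLoop_of_chain hist n com hch (hist.length + 1) p (by omega)]
  rfl
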